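-- pv_equiv track=rewrite | github.com/karenz50/test_repo_1 | q1.2.py | calc_lonely_cow
-- ===== SOURCE A (Python) =====
-- def calc_lonely_cow(total_cows, cow_str):
--     total_lonely_cow = 0
--     #for offset in range(3, total_cows + 1):
--     for offset in range(3, 60):
--         for start_pos in range(0, total_cows):
--             total_count_g = total_count_h = 0
--             if start_pos + offset > total_cows:
--                 break
--             for cur_index in range(start_pos, start_pos + offset):
--                 if cow_str[cur_index] == "G":
--                     total_count_g += 1
--                 else:
--                     total_count_h += 1
--
--                 if total_count_g >= 2 and total_count_h >= 2:
--                     break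
--             if total_count_g == 1 or total_count_h == 1:
--                 total_lonely_cow += 1
--
--     return total_lonely_cow
-- ===== SOURCE B (Python) =====
-- def calc_lonely_cow(total_cows, cow_str):
--     m = max(total_cows, 0)
--     pre = [0]
--     run = 0
--     for c in cow_str[:m]:
--         if c == "G":
--             run += 1
--         pre.append(run)
--     total = 0
--     for offset in range(3, 60):
--         for start in range(m - offset + 1):
--             g = pre[start + offset] - pre[start]
--             if g == 1 or offset - g == 1:
--                 total += 1
--     return total
-- ===== Notes on version B (the rewrite author's own statement) =====
-- stated objective: faster
-- what changed: B precomputes a prefix-sum table of G-counts once and decides each (offset, start) window in O(1) arithmetic, replacing A's per-window character rescan.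
import Mathlib
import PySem

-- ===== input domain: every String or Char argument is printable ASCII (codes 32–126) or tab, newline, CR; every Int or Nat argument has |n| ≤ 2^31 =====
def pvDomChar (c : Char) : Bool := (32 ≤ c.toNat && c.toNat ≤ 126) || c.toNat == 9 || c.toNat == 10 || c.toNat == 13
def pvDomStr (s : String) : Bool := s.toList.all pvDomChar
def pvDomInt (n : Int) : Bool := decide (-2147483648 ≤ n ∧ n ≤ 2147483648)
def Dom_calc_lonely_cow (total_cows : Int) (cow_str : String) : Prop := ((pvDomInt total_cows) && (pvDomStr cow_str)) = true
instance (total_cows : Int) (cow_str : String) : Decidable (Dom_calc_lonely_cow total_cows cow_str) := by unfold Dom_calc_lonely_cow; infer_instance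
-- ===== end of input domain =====

-- B replaces A's per-window character rescan by a prefix-sum table of G-counts (O(1) per window instead of O(offset)); same count on every input where A does not raise.


-- ===== PORT A =====
-- the inner `for cur_index in range(start_pos, start_pos + offset)` loop with its early `break`
def pvInnerA (cs : List Char) : List Int → Int → Int → Int × Int
  | [], g, h => (g, h)
  | i :: rest, g, h =>
    let p : Int × Int :=
      if (PySem.List.pyGet? cs i).getD 'H' = 'G' then (g + 1, h) else (g, h + 1)
    if p.1 ≥ 2 ∧ p.2 ≥ 2 then p else pvInnerA cs rest p.1 p.2

-- the middle `for start_pos in range(0, total_cows)` loop with its `break`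
def pvMidA (cs : List Char) (n off : Int) : List Int → Int → Int
  | [], acc => acc
  | s :: rest, acc =>
    if s + off > n then acc
    else
      let p := pvInnerA cs (PySem.List.pyRange s (s + off) 1) 0 0
      pvMidA cs n off rest (if p.1 = 1 ∨ p.2 = 1 then acc + 1 else acc)

def calc_lonely_cow (total_cows : Int) (cow_str : String) : Int :=
  (PySem.List.pyRange 3 60 1).foldl
    (fun acc off => pvMidA cow_str.toList total_cows off (PySem.List.pyRange 0 total_cows 1) acc) 0

-- ===== PORT B =====
-- one step of B's prefix-building loop: append the running G-count after reading one char
def pvPf (st : List Int × Int) (c : Char) : List Int × Int :=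
  let run := if c = 'G' then st.2 + 1 else st.2
  (st.1 ++ [run], run)

def calc_lonely_cow_alt (total_cows : Int) (cow_str : String) : Int :=
  let m := max total_cows 0
  let pr := (PySem.List.slice cow_str.toList none (some m)).foldl pvPf ([0], 0)
  let pre := pr.1
  (PySem.List.pyRange 3 60 1).foldl (fun acc off =>
    (PySem.List.pyRange 0 (m - off + 1) 1).foldl (fun acc2 start =>
      let g := (PySem.List.pyGet? pre (start + off)).getD 0 - (PySem.List.pyGet? pre start).getD 0
      if g = 1 ∨ off - g = 1 then acc2 + 1 else acc2) acc) 0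

-- ===== PRECONDITION & SPEC =====
-- Pre_ excludes exactly the inputs where A raises IndexError: total_cows ≥ 3 with cow_str shorter than total_cows.
def Pre_calc_lonely_cow (total_cows : Int) (cow_str : String) : Prop :=
  total_cows < 3 ∨ total_cows ≤ (cow_str.toList.length : Int)
instance (total_cows : Int) (cow_str : String) : Decidable (Pre_calc_lonely_cow total_cows cow_str) := by
  unfold Pre_calc_lonely_cow; infer_instance
def pvWitness_calc_lonely_cow : Int × String := (5, "GHGGH")

def Spec_calc_lonely_cow (total_cows : Int) (cow_str : String) (out : Int) : Prop := out = calc_lonely_cow_alt total_cows cow_str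
instance (total_cows : Int) (cow_str : String) (out : Int) : Decidable (Spec_calc_lonely_cow total_cows cow_str out) := by unfold Spec_calc_lonely_cow; infer_instance

-- ===== CLAIM (what is proved, stated in full; the proofs are below) =====
def Claim_equal_calc_lonely_cow : Prop := ∀ (total_cows : Int) (cow_str : String), Dom_calc_lonely_cow total_cows cow_str → Pre_calc_lonely_cow total_cows cow_str → Spec_calc_lonely_cow total_cows cow_str (calc_lonely_cow total_cows cow_str)

-- ===== LEMMAS AND PROOFS =====

def pcB (cs : List Char) (i : Int) : Bool := decide ((PySem.List.pyGet? cs i).getD 'H' = 'G')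

lemma innerA_one_iff (cs : List Char) (idxs : List Int) (g h : Int) (hg : 0 ≤ g) (hh : 0 ≤ h) :
    ((pvInnerA cs idxs g h).1 = 1 ∨ (pvInnerA cs idxs g h).2 = 1) ↔
    (g + (idxs.countP (pcB cs) : Int) = 1 ∨
     h + ((idxs.length : Int) - (idxs.countP (pcB cs) : Int)) = 1) := by
  induction idxs generalizing g h with
  | nil => simp [pvInnerA]
  | cons i rest ih =>
    have hcr : rest.countP (pcB cs) ≤ rest.length := List.countP_le_length
    by_cases hc : (PySem.List.pyGet? cs i).getD 'H' = 'G'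
    · by_cases hbr : g + 1 ≥ 2 ∧ h ≥ 2
      · have hred : pvInnerA cs (i :: rest) g h = (g + 1, h) := by
          simp [pvInnerA, hc, hbr.1, hbr.2]
        rw [hred]
        simp only [List.countP_cons, pcB, decide_eq_true_eq, hc, if_true, List.length_cons]
        push_cast
        omega
      · simp only [pvInnerA, hc, if_true, hbr, if_false]
        rw [ih (g+1) h (by omega) hh]
        simp only [List.countP_cons, pcB, decide_eq_true_eq, hc, if_true, List.length_cons]
        push_cast
        omega
    · by_cases hbr : g ≥ 2 ∧ h + 1 ≥ 2
      · have hred : pvInnerA cs (i :: rest) g h = (g, h + 1) := by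
          simp [pvInnerA, hc, hbr.1, hbr.2]
        rw [hred]
        simp only [List.countP_cons, pcB, decide_eq_true_eq, hc, List.length_cons]
        push_cast
        omega
      · simp only [pvInnerA, hc, if_false, hbr]
        rw [ih g (h+1) hg (by omega)]
        simp only [List.countP_cons, pcB, decide_eq_true_eq, hc, List.length_cons]
        push_cast
        omega

lemma countP_pyRange_window (cs : List Char) (off : Nat) : ∀ (k : Nat), k + off ≤ cs.length →
    (PySem.List.pyRange (k : Int) ((k : Int) + (off : Int)) 1).countP (pcB cs)
    = ((cs.drop k).take off).countP (fun c => decide (c = 'G')) := by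
  induction off with
  | zero =>
    intro k _
    rw [PySem.List.pyRange_one_eq_nil (by omega)]
    simp
  | succ off ih =>
    intro k hk
    have hklt : k < cs.length := by omega
    rw [PySem.List.pyRange_one_cons (by push_cast; omega), List.countP_cons]
    rw [← List.getElem_cons_drop (as := cs) hklt]
    rw [List.take_succ_cons, List.countP_cons]
    have hpc : pcB cs (k : Int) = decide (cs[k] = 'G') := by
      simp [pcB, PySem.List.pyGet?_natCast, List.getElem?_eq_getElem hklt]
    have harg : (k : Int) + 1 = ((k + 1 : Nat) : Int) := by push_cast; ring
    have harg2 : (k : Int) + ((off + 1 : Nat) : Int) = ((k+1 : Nat) : Int) + (off : Nat) := by push_cast; ring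
    rw [harg2, ← harg] at *
    rw [show ((k : Int) + 1) = ((k+1 : Nat) : Int) by push_cast; ring]
    rw [ih (k+1) (by omega)]
    simp [hpc]

lemma foldPre_spec (l : List Char) : ∀ (acc : List Int) (run : Int),
    l.foldl pvPf (acc, run) =
      (acc ++ (List.range l.length).map
          (fun j => run + ((l.take (j+1)).countP (fun c => decide (c = 'G')) : Int)),
       run + (l.countP (fun c => decide (c = 'G')) : Int)) := by
  induction l with
  | nil => intro acc run; simp
  | cons c l ih =>
    intro acc run
    rw [List.foldl_cons,
      show pvPf (acc, run) c = (acc ++ [if c = 'G' then run + 1 else run],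
        if c = 'G' then run + 1 else run) from rfl]
    rw [ih]
    rw [List.length_cons, List.range_succ_eq_map, List.map_cons, List.map_map]
    by_cases hc : c = 'G'
    · simp [hc, List.append_assoc, Function.comp]
      exact ⟨fun j _ => by ring, by ring⟩
    · simp [hc, List.append_assoc, Function.comp]

lemma pre_get (l : List Char) (k : Nat) (hk : k ≤ l.length) :
    (PySem.List.pyGet? (l.foldl pvPf ([0], 0)).1 (k : Int)).getD 0
      = ((l.take k).countP (fun c => decide (c = 'G')) : Int) := by
  rw [foldPre_spec]
  rw [PySem.List.pyGet?_natCast]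
  cases k with
  | zero => simp
  | succ j =>
    have hj : j < l.length := by omega
    rw [List.singleton_append, List.getElem?_eq_getElem (by simpa using hj)]
    simp

lemma window_sub (l : List Char) (s off : Nat) :
    ((l.take (s + off)).countP (fun c => decide (c = 'G')) : Int)
      - ((l.take s).countP (fun c => decide (c = 'G')) : Int)
      = (((l.drop s).take off).countP (fun c => decide (c = 'G')) : Int) := by
  rw [List.take_add, List.countP_append]
  push_cast
  ring

lemma pvMidA_append (cs : List Char) (n off : Int) (l1 l2 : List Int)
    (h : ∀ s ∈ l1, s + off ≤ n) (acc : Int) :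
    pvMidA cs n off (l1 ++ l2) acc = pvMidA cs n off l2 (l1.foldl (fun a s =>
      if (pvInnerA cs (PySem.List.pyRange s (s + off) 1) 0 0).1 = 1 ∨
         (pvInnerA cs (PySem.List.pyRange s (s + off) 1) 0 0).2 = 1 then a + 1 else a) acc) := by
  induction l1 generalizing acc with
  | nil => simp
  | cons s l1 ih =>
    have hs := h s (List.mem_cons_self ..)
    rw [List.cons_append, List.foldl_cons]
    show (if s + off > n then _ else _) = _
    rw [if_neg (by omega)]
    exact ih (fun x hx => h x (List.mem_cons_of_mem _ hx)) _

lemma pvMidA_stop (cs : List Char) (n off s : Int) (rest : List Int) (acc : Int)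
    (h : s + off > n) : pvMidA cs n off (s :: rest) acc = acc := by
  simp [pvMidA, h]

lemma window_in_take (cs : List Char) (a b N : Nat) (h : a + b ≤ N) :
    ((cs.take N).drop a).take b = (cs.drop a).take b := by
  rw [List.drop_take, List.take_take, min_eq_left (by omega)]

lemma stepA_cond_iff (cs : List Char) (off s : Int) (hs0 : 0 ≤ s) (h3 : 3 ≤ off)
    (hlen : s + off ≤ (cs.length : Int)) :
    ((pvInnerA cs (PySem.List.pyRange s (s + off) 1) 0 0).1 = 1 ∨
     (pvInnerA cs (PySem.List.pyRange s (s + off) 1) 0 0).2 = 1) ↔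
    ((((cs.drop s.toNat).take off.toNat).countP (fun c => decide (c = 'G')) : Int) = 1 ∨
     off - (((cs.drop s.toNat).take off.toNat).countP (fun c => decide (c = 'G')) : Int) = 1) := by
  rw [innerA_one_iff cs _ 0 0 le_rfl le_rfl]
  have hcast : (s.toNat : Int) = s := Int.toNat_of_nonneg hs0
  have hoffc : ((off.toNat : Nat) : Int) = off := Int.toNat_of_nonneg (by omega)
  have hwin := countP_pyRange_window cs off.toNat s.toNat (by omega)
  rw [hcast, hoffc] at hwin
  rw [hwin]
  rw [PySem.List.length_pyRange_one]
  have : ((s + off - s).toNat : Int) = off := by omega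
  omega

lemma preGet_window (cs : List Char) (n s off : Int) (hn : 0 ≤ n)
    (hlen : n ≤ (cs.length : Int)) (hs0 : 0 ≤ s) (hoff : 0 ≤ off) (hso : s + off ≤ n) :
    (PySem.List.pyGet? ((PySem.List.slice cs none (some n)).foldl pvPf ([0], 0)).1 (s + off)).getD 0
      - (PySem.List.pyGet? ((PySem.List.slice cs none (some n)).foldl pvPf ([0], 0)).1 s).getD 0
    = (((cs.drop s.toNat).take off.toNat).countP (fun c => decide (c = 'G')) : Int) := by
  rw [PySem.List.slice_to cs hn]
  have hl : (cs.take n.toNat).length = n.toNat := by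
    rw [List.length_take]
    omega
  have h1 : ((s + off).toNat : Int) = s + off := Int.toNat_of_nonneg (by omega)
  have h2 : (s.toNat : Int) = s := Int.toNat_of_nonneg hs0
  have pg1 := pre_get (cs.take n.toNat) (s + off).toNat (by omega)
  have pg2 := pre_get (cs.take n.toNat) s.toNat (by omega)
  rw [h1] at pg1
  rw [h2] at pg2
  rw [pg1, pg2]
  have h3 : (s + off).toNat = s.toNat + off.toNat := by omega
  rw [h3, window_sub]
  rw [window_in_take cs s.toNat off.toNat n.toNat (by omega)]

lemma perOffset (cs : List Char) (n off : Int) (hn3 : 3 ≤ n) (hlen : n ≤ (cs.length : Int))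
    (hoff : 3 ≤ off) (acc : Int) :
    pvMidA cs n off (PySem.List.pyRange 0 n 1) acc
      = (PySem.List.pyRange 0 (n - off + 1) 1).foldl (fun acc2 start =>
          let g := (PySem.List.pyGet? ((PySem.List.slice cs none (some n)).foldl pvPf ([0], 0)).1 (start + off)).getD 0
                 - (PySem.List.pyGet? ((PySem.List.slice cs none (some n)).foldl pvPf ([0], 0)).1 start).getD 0
          if g = 1 ∨ off - g = 1 then acc2 + 1 else acc2) acc := by
  by_cases hcase : off ≤ n
  · rw [PySem.List.pyRange_one_append 0 (n - off + 1) n (by omega) (by omega)]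
    rw [pvMidA_append cs n off _ _ (fun x hx => by
      have := PySem.List.mem_pyRange_one.mp hx; omega) acc]
    rw [PySem.List.pyRange_one_cons (show n - off + 1 < n by omega)]
    rw [pvMidA_stop cs n off _ _ _ (by omega)]
    apply PySem.List.foldl_congr_mem
    intro a x hx
    have hmem := PySem.List.mem_pyRange_one.mp hx
    have hcond := stepA_cond_iff cs off x (by omega) hoff (by omega)
    have hg := preGet_window cs n x off (by omega) hlen (by omega) (by omega) (by omega)
    rw [hg]
    exact if_congr hcond rfl rfl
  · rw [PySem.List.pyRange_one_eq_nil (show n - off + 1 ≤ 0 by omega)]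
    rw [PySem.List.pyRange_one_cons (show (0:Int) < n by omega)]
    rw [pvMidA_stop cs n off _ _ _ (by omega)]
    simp

lemma pvMain (n : Int) (s : String) (hpre : n < 3 ∨ n ≤ (s.toList.length : Int)) :
    calc_lonely_cow n s = calc_lonely_cow_alt n s := by
  by_cases hn3 : 3 ≤ n
  · have hlen : n ≤ (s.toList.length : Int) := by omega
    unfold calc_lonely_cow calc_lonely_cow_alt
    simp only [max_eq_left (show (0:Int) ≤ n by omega)]
    apply PySem.List.foldl_congr_mem
    intro acc off hoff
    have hmem := PySem.List.mem_pyRange_one.mp hoff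
    exact perOffset s.toList n off hn3 hlen (by omega) acc
  · have hA : calc_lonely_cow n s = 0 := by
      unfold calc_lonely_cow
      have hstep : ∀ (acc : Int), ∀ off ∈ PySem.List.pyRange 3 60 1,
          pvMidA s.toList n off (PySem.List.pyRange 0 n 1) acc = (fun (a : Int) (_ : Int) => a) acc off := by
        intro acc off hoff
        have hmem := PySem.List.mem_pyRange_one.mp hoff
        by_cases hn0 : n ≤ 0
        · rw [PySem.List.pyRange_one_eq_nil (show n ≤ 0 by omega)]
          rfl
        · rw [PySem.List.pyRange_one_cons (show (0:Int) < n by omega)]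
          exact pvMidA_stop _ _ _ _ _ _ (by omega)
      rw [PySem.List.foldl_congr_mem _ _ _ 0 hstep, List.foldl_fixed]
    have hB : calc_lonely_cow_alt n s = 0 := by
      unfold calc_lonely_cow_alt
      simp only
      have hstep : ∀ (acc : Int), ∀ off ∈ PySem.List.pyRange 3 60 1,
          (PySem.List.pyRange 0 (max n 0 - off + 1) 1).foldl (fun acc2 start =>
            let g := (PySem.List.pyGet? ((PySem.List.slice s.toList none (some (max n 0))).foldl pvPf ([0], 0)).1 (start + off)).getD 0
                   - (PySem.List.pyGet? ((PySem.List.slice s.toList none (some (max n 0))).foldl pvPf ([0], 0)).1 start).getD 0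
            if g = 1 ∨ off - g = 1 then acc2 + 1 else acc2) acc = (fun (a : Int) (_ : Int) => a) acc off := by
        intro acc off hoff
        have hmem := PySem.List.mem_pyRange_one.mp hoff
        rw [PySem.List.pyRange_one_eq_nil (show max n 0 - off + 1 ≤ 0 by omega)]
        rfl
      rw [PySem.List.foldl_congr_mem _ _ _ 0 hstep, List.foldl_fixed]
    rw [hA, hB]

-- ===== VERDICT (by name: the statement is the Claim_ definition above) =====
theorem calc_lonely_cow_spec : Claim_equal_calc_lonely_cow := by
  intro n s _ hpre
  unfold Spec_calc_lonely_cow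
  exact pvMain n s hpre
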